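-- pv_equiv track=rewrite | github.com/SimonBisgaard/.Enron | train_per_market_interactions_multimodel.py | _parse_peak_hours
-- ===== SOURCE A (Python) =====
-- def _parse_peak_hours(raw: str) -> list[int]:
--     vals = [x.strip() for x in raw.split(",") if x.strip()]
--     if not vals:
--         raise ValueError("--peak-hours must contain at least one hour.")
--     out: list[int] = []
--     for v in vals:
--         h = int(v)
--         if h < 0 or h > 23:
--             raise ValueError(f"Invalid hour in --peak-hours: {h}")
--         out.append(h)
--     return sorted(set(out))
-- ===== SOURCE B (Python) =====
-- def _parse_peak_hours(raw: str) -> list[int]: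
--     vals = [x.strip() for x in raw.split(",") if x.strip()]
--     if not vals:
--         raise ValueError("--peak-hours must contain at least one hour.")
--     seen = [False] * 24
--     for v in vals:
--         h = int(v)
--         if h < 0 or h > 23:
--             raise ValueError(f"Invalid hour in --peak-hours: {h}")
--         seen[h] = True
--     return [i for i in range(24) if seen[i]]
-- ===== Notes on version B (the rewrite author's own statement) =====
-- stated objective: alternative
-- what changed: Replaces collecting hours into a list and then sorted(set(out)) by marking a fixed 24-slot boolean presence array and emitting the result with a single scan over range(24), removing the set and the comparison sort.
import Mathlib
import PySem

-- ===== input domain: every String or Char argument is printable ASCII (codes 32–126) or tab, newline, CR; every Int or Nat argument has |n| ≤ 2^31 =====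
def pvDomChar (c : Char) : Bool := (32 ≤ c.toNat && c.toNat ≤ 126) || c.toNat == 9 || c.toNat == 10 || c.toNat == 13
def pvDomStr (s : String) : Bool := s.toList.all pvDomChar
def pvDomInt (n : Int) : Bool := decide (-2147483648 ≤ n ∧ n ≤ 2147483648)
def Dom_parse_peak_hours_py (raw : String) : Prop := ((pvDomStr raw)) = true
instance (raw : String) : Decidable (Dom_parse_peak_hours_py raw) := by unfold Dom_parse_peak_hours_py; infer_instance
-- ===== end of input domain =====

-- B replaces sorted(set(out)) by a 24-slot boolean presence array scanned once over range(24): an alternative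
-- strategy with no sort and no set. Equivalence is about the return value on inputs where A returns (see Pre_).

-- ===== PORT A =====
-- vals = [x.strip() for x in raw.split(",") if x.strip()]
def pvVals (raw : String) : List String :=
  (((PySem.Str.split? raw ",").getD []).map PySem.Str.strip).filter (fun v => v ≠ "")

-- out: loop appending h = int(v); the range-check raise happens under ¬Pre_ only (excluded), so getD is unreached;
-- result: sorted(set(out))
def parse_peak_hours_py (raw : String) : List Int :=
  PySem.List.sorted
    (PySem.Set.ofList ((pvVals raw).foldl (fun acc v => acc ++ [(PySem.Int.ofStr? v).getD 0]) []))
    (fun x => x) false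

-- ===== PORT B =====
-- seen = [False]*24 with seen[h] = True for each parsed hour, then [i for i in range(24) if seen[i]]
def parse_peak_hours_py_alt (raw : String) : List Int :=
  (PySem.List.pyRange 0 24 1).filter (fun i =>
    ((pvVals raw).foldl (fun s v => s.set ((PySem.Int.ofStr? v).getD 0).toNat true)
      (List.replicate 24 false)).getD i.toNat false)

-- ===== PRECONDITION & SPEC =====
-- Pre_ excludes exactly the inputs on which A raises ValueError: no non-empty token, a token int() rejects,
-- or a token parsing to an hour outside 0..23 (B raises the identical ValueError on the same inputs).
def Pre_parse_peak_hours_py (raw : String) : Prop :=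
  pvVals raw ≠ [] ∧
  ∀ v ∈ pvVals raw, 0 ≤ (PySem.Int.ofStr? v).getD (-1) ∧ (PySem.Int.ofStr? v).getD (-1) ≤ 23
instance (raw : String) : Decidable (Pre_parse_peak_hours_py raw) := by
  unfold Pre_parse_peak_hours_py; infer_instance
def pvWitness_parse_peak_hours_py : String := "13, 7,7"
def Spec_parse_peak_hours_py (raw : String) (out : List Int) : Prop := out = parse_peak_hours_py_alt raw
instance (raw : String) (out : List Int) : Decidable (Spec_parse_peak_hours_py raw out) := by unfold Spec_parse_peak_hours_py; infer_instance

-- ===== CLAIM (what is proved, stated in full; the proofs are below) =====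
def Claim_equal_parse_peak_hours_py : Prop := ∀ (raw : String), Dom_parse_peak_hours_py raw → Pre_parse_peak_hours_py raw → Spec_parse_peak_hours_py raw (parse_peak_hours_py raw)

-- ===== LEMMAS AND PROOFS =====

-- A's append loop builds the map of the parser over the tokens
theorem pv_foldl_append (f : String → Int) (l : List String) (acc : List Int) :
    l.foldl (fun a v => a ++ [f v]) acc = acc ++ l.map f := by
  induction l generalizing acc with
  | nil => simp
  | cons x t ih => simp [List.foldl, ih]

-- B's presence fold, characterised slot by slot
theorem pv_seen_getD (l : List Int) (s : List Bool) (k : Nat) (hk : k < s.length) :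
    ((l.foldl (fun s h => s.set h.toNat true) s).getD k false) =
      (s.getD k false || l.any (fun h => h.toNat == k)) := by
  induction l generalizing s with
  | nil => simp
  | cons h t ih =>
    simp only [List.foldl, List.any_cons]
    rw [ih (s.set h.toNat true) (by simpa using hk)]
    by_cases hek : h.toNat = k
    · subst hek
      simp [List.getD_eq_getElem?_getD, hk]
    · have hb : (h.toNat == k) = false := by simpa using hek
      simp [List.getD_eq_getElem?_getD, List.getElem?_set_ne hek, hb]

theorem parse_peak_hours_py_spec : Claim_equal_parse_peak_hours_py := by
  intro raw _ hpre
  unfold Spec_parse_peak_hours_py parse_peak_hours_py parse_peak_hours_py_alt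
  obtain ⟨-, hv⟩ := hpre
  set f : String → Int := fun v => (PySem.Int.ofStr? v).getD 0 with hf
  rw [pv_foldl_append f (pvVals raw) []]
  simp only [List.nil_append]
  set hs : List Int := (pvVals raw).map f with hhs
  -- every parsed hour is in [0, 24)
  have hrange : ∀ h ∈ hs, 0 ≤ h ∧ h < 24 := by
    intro h hh
    rw [hhs] at hh
    obtain ⟨v, hvmem, rfl⟩ := List.mem_map.mp hh
    obtain ⟨h0, h23⟩ := hv v hvmem
    rcases ho : PySem.Int.ofStr? v with _ | n
    · simp [ho] at h0
    · simp only [hf, ho, Option.getD_some] at *; omega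
  have hfold : (pvVals raw).foldl (fun s v => s.set ((PySem.Int.ofStr? v).getD 0).toNat true)
      (List.replicate 24 false) = hs.foldl (fun s h => s.set h.toNat true) (List.replicate 24 false) := by
    rw [hhs, List.foldl_map]
  rw [hfold]
  set seen := hs.foldl (fun s h => s.set h.toNat true) (List.replicate 24 false) with hseen
  set ys := (PySem.List.pyRange 0 24 1).filter (fun i => seen.getD i.toNat false) with hys
  -- membership in B's output
  have hmem : ∀ i : Int, i ∈ ys ↔ i ∈ hs := by
    intro i
    rw [hys, List.mem_filter, PySem.List.mem_pyRange_one]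
    constructor
    · rintro ⟨⟨hi0, hi24⟩, hfil⟩
      rw [hseen, pv_seen_getD hs _ _ (by simp; omega), List.getD_eq_getElem?_getD,
        List.getElem?_replicate] at hfil
      rw [if_pos (show i.toNat < 24 by omega)] at hfil
      simp only [Option.getD_some, Bool.false_or, List.any_eq_true, beq_iff_eq] at hfil
      obtain ⟨h, hh, hhe⟩ := hfil
      obtain ⟨hh0, _⟩ := hrange h hh
      have : h = i := by omega
      exact this ▸ hh
    · intro hi
      obtain ⟨hi0, hi24⟩ := hrange i hi
      refine ⟨⟨hi0, hi24⟩, ?_⟩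
      rw [hseen, pv_seen_getD hs _ _ (by simp; omega), List.getD_eq_getElem?_getD,
        List.getElem?_replicate, if_pos (show i.toNat < 24 by omega)]
      simp only [Option.getD_some, Bool.false_or, List.any_eq_true, beq_iff_eq]
      exact ⟨i, hi, rfl⟩
  -- B's output is a strictly increasing rearrangement of set(out), hence equals sorted(set(out))
  have hnys : ys.Nodup := List.Nodup.filter _ (PySem.List.nodup_pyRange_one 0 24)
  have hperm : ys.Perm (PySem.Set.ofList hs) := by
    rw [List.perm_ext_iff_of_nodup hnys (PySem.Set.nodup_ofList hs)]
    intro a; rw [hmem a, PySem.Set.mem_ofList]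
  have hpair : ys.Pairwise (fun a b : Int => a < b) :=
    List.Pairwise.filter _ (PySem.List.pairwise_lt_pyRange_one 0 24)
  exact (PySem.List.sorted_eq_of_perm_of_pairwise_lt _ _ (fun x : Int => x) hperm (by exact hpair))
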